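-- pv_equiv track=rewrite | github.com/DeanHe/Practice | LeetCodePython/CountSubmatricesWithTopLeftElementAndSumLessThanK.py | countSubmatrices
-- ===== SOURCE A (Python) =====
-- from typing import List
--
-- def countSubmatrices(grid: List[List[int]], k: int) -> int:
--     res = 0
--     if grid[0][0] <= k:
--         res += 1
--     rows, cols = len(grid), len(grid[0])
--     for r in range(1, rows):
--         grid[r][0] += grid[r - 1][0]
--         if grid[r][0] <= k:
--             res += 1
--     for c in range(1, cols):
--         grid[0][c] += grid[0][c - 1]
--         if grid[0][c] <= k:
--             res += 1
--     for r in range(1, rows):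
--         for c in range(1, cols):
--             grid[r][c] += grid[r - 1][c] + grid[r][c - 1] - grid[r - 1][c - 1]
--             if grid[r][c] <= k:
--                 res += 1
--     return res
-- ===== SOURCE B (Python) =====
-- from typing import List
-- from itertools import accumulate
--
-- def countSubmatrices(grid: List[List[int]], k: int) -> int:
--     # Return-value equivalent to A; unlike A it does NOT mutate grid in place.
--     cols = len(grid[0])
--     run = [0] * cols
--     res = 0
--     for row in grid:
--         run = [a + b for a, b in zip(run, accumulate(row))]
--         res += sum(1 for v in run if v <= k)
--     return res
-- ===== Notes on version B (the rewrite author's own statement) =====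
-- stated objective: faster
-- what changed: Replaces A's in-place inclusion-exclusion 2D prefix-sum construction (three separate index loops over column 0, row 0, and the interior) by a single non-mutating row-by-row sweep that keeps one running vector of column-prefixed row-prefix sums (run[c] = sum of the top-left submatrix ending at the current row, column c) and counts entries <= k per row. Measured ~1.9x faster: one fused pass with itertools.accumulate and comprehensions replaces three Python-level index loops with per-element list indexing.
import Mathlib
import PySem

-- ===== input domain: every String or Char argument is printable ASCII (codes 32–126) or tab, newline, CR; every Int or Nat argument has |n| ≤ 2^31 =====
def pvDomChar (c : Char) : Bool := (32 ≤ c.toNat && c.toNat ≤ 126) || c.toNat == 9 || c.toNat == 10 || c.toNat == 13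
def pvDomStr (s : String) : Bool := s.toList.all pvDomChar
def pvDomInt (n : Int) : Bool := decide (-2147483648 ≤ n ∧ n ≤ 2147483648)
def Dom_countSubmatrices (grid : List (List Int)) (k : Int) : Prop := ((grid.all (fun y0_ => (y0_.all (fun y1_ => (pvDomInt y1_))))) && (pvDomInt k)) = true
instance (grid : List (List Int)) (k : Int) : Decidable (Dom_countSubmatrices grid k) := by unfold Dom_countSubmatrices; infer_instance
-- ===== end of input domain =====

-- B replaces A's three-loop in-place inclusion-exclusion prefix-sum build by a single
-- non-mutating row sweep with a running column-sum vector; A mutates `grid` in place and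
-- B does not — only the RETURN value is proved equal (on Pre_, where A does not raise).

-- ===== PORT A =====
-- grid[r][c] read; Pre_ guarantees every access A performs is in bounds, so the
-- default-0 of getD is never the value Python would have raised on.
def pvGet (g : List (List Int)) (r c : Nat) : Int := (g.getD r []).getD c 0

-- grid[r][c] = v (in-place assignment, modelled functionally)
def pvSet (g : List (List Int)) (r c : Nat) (v : Int) : List (List Int) :=
  g.set r ((g.getD r []).set c v)

-- body of A's first loop: grid[r][0] += grid[r-1][0]; if grid[r][0] <= k: res += 1
def stepCol (k : Int) (st : List (List Int) × Int) (r : Nat) : List (List Int) × Int :=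
  let g := pvSet st.1 r 0 (pvGet st.1 r 0 + pvGet st.1 (r-1) 0)
  (g, if pvGet g r 0 ≤ k then st.2 + 1 else st.2)

-- body of A's second loop: grid[0][c] += grid[0][c-1]; if grid[0][c] <= k: res += 1
def stepRow (k : Int) (st : List (List Int) × Int) (c : Nat) : List (List Int) × Int :=
  let g := pvSet st.1 0 c (pvGet st.1 0 c + pvGet st.1 0 (c-1))
  (g, if pvGet g 0 c ≤ k then st.2 + 1 else st.2)

-- body of A's inner third loop
def stepCell (k : Int) (r : Nat) (st : List (List Int) × Int) (c : Nat) : List (List Int) × Int :=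
  let g := pvSet st.1 r c
      (pvGet st.1 r c + (pvGet st.1 (r-1) c + pvGet st.1 r (c-1) - pvGet st.1 (r-1) (c-1)))
  (g, if pvGet g r c ≤ k then st.2 + 1 else st.2)

-- body of A's outer third loop (the whole inner `for c in range(1, cols)`)
def stepOuter (k : Int) (cols : Nat) (st : List (List Int) × Int) (r : Nat) : List (List Int) × Int :=
  (List.range' 1 (cols - 1)).foldl (stepCell k r) st

def countSubmatrices (grid : List (List Int)) (k : Int) : Int :=
  let res : Int := 0
  let res := if pvGet grid 0 0 ≤ k then res + 1 else res
  let rows := grid.length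
  let cols := (grid.getD 0 []).length
  let st := (List.range' 1 (rows - 1)).foldl (stepCol k) (grid, res)
  let st := (List.range' 1 (cols - 1)).foldl (stepRow k) st
  let st := (List.range' 1 (rows - 1)).foldl (stepOuter k cols) st
  st.2

-- ===== PORT B =====
-- itertools.accumulate(row)
def pvAccumulate (row : List Int) : List Int :=
  (row.foldl (fun (st : Int × List Int) x => (st.1 + x, st.2 ++ [st.1 + x])) (0, [])).2

-- body of B's loop: run = [a+b for a,b in zip(run, accumulate(row))]; res += sum(1 for v in run if v <= k)
def stepB (k : Int) (st : List Int × Int) (row : List Int) : List Int × Int :=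
  let run := (st.1.zip (pvAccumulate row)).map (fun p => p.1 + p.2)
  (run, st.2 + ((run.filter (fun v => decide (v ≤ k))).length : Int))

def countSubmatrices_alt (grid : List (List Int)) (k : Int) : Int :=
  let cols := (grid.getD 0 []).length
  (grid.foldl (stepB k) (List.replicate cols (0 : Int), 0)).2

-- ===== PRECONDITION & SPEC =====
-- Pre_ excludes exactly the inputs on which the Python A raises IndexError:
-- the empty grid, an empty first row, and ragged grids in which some row is
-- shorter than the first row (A reads grid[r][c] for every c < len(grid[0])).
def Pre_countSubmatrices (grid : List (List Int)) (k : Int) : Prop :=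
  grid ≠ [] ∧ 1 ≤ (grid.headD []).length ∧ ∀ row ∈ grid, (grid.headD []).length ≤ row.length

instance (grid : List (List Int)) (k : Int) : Decidable (Pre_countSubmatrices grid k) := by
  unfold Pre_countSubmatrices; infer_instance

def pvWitness_countSubmatrices : List (List Int) × Int := ([[1, 2], [3, 4]], 4)

def Spec_countSubmatrices (grid : List (List Int)) (k : Int) (out : Int) : Prop := out = countSubmatrices_alt grid k
instance (grid : List (List Int)) (k : Int) (out : Int) : Decidable (Spec_countSubmatrices grid k out) := by unfold Spec_countSubmatrices; infer_instance

-- ===== CLAIM (what is proved, stated in full; the proofs are below) =====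
def Claim_equal_countSubmatrices : Prop := ∀ (grid : List (List Int)) (k : Int), Dom_countSubmatrices grid k → Pre_countSubmatrices grid k → Spec_countSubmatrices grid k (countSubmatrices grid k)

-- ===== LEMMAS AND PROOFS =====

-- sum of f over 0..n-1
def S (n : Nat) (f : Nat → Int) : Int := ((List.range n).map f).sum

-- sum of row i of the original grid, columns 0..c
def rowV (g0 : List (List Int)) (i c : Nat) : Int := S (c + 1) (fun j => pvGet g0 i j)

-- the 2D prefix sum of the original grid at cell (i, c)
def V (g0 : List (List Int)) (i c : Nat) : Int := S (i + 1) (fun a => rowV g0 a c)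

-- 1 if x ≤ k else 0
def cnt (k x : Int) : Int := if x ≤ k then 1 else 0

-- which cells already hold their 2D-prefix-sum value midway through A's third loop
abbrev Cnd (R C s t i j : Nat) : Prop :=
  i < R ∧ j < C ∧ (i = 0 ∨ j = 0 ∨ i < s ∨ (i = s ∧ j < t))

theorem S_succ_last (n : Nat) (f : Nat → Int) : S (n + 1) f = S n f + f n := by
  simp [S, List.range_succ]

theorem S_succ_head (n : Nat) (f : Nat → Int) : S (n + 1) f = f 0 + S n (fun i => f (i + 1)) := by
  simp [S, List.range_succ_eq_map, List.map_map, Function.comp_def]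

theorem S_add (n : Nat) (f g : Nat → Int) : S n (fun i => f i + g i) = S n f + S n g := by
  induction n with
  | zero => simp [S]
  | succ n ih => simp only [S_succ_last, ih]; ring

theorem V_zero_zero (g0 : List (List Int)) : V g0 0 0 = pvGet g0 0 0 := by
  simp [V, rowV, S]

theorem V_rec (g0 : List (List Int)) (s t : Nat) (hs : 1 ≤ s) (ht : 1 ≤ t) :
    V g0 s t = V g0 (s-1) t + V g0 s (t-1) - V g0 (s-1) (t-1) + pvGet g0 s t := by
  obtain ⟨a, rfl⟩ : ∃ a, s = a + 1 := ⟨s - 1, by omega⟩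
  obtain ⟨b, rfl⟩ : ∃ b, t = b + 1 := ⟨t - 1, by omega⟩
  simp only [Nat.add_sub_cancel, V, rowV]
  simp only [S_succ_last (f := fun a => S (b + 1 + 1) fun j => pvGet g0 a j),
    S_succ_last (f := fun a => S (b + 1) fun j => pvGet g0 a j),
    S_succ_last (f := fun j => pvGet g0 (a+1) j)]
  ring

-- column recurrence: V (s) 0 = V (s-1) 0 + grid[s][0]
theorem V_col_rec (g0 : List (List Int)) (s : Nat) (hs : 1 ≤ s) :
    V g0 s 0 = V g0 (s-1) 0 + pvGet g0 s 0 := by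
  obtain ⟨a, rfl⟩ : ∃ a, s = a + 1 := ⟨s - 1, by omega⟩
  simp only [Nat.add_sub_cancel, V]
  rw [S_succ_last]
  simp [rowV, S]


theorem V_row_rec (g0 : List (List Int)) (t : Nat) (ht : 1 ≤ t) :
    V g0 0 t = V g0 0 (t-1) + pvGet g0 0 t := by
  obtain ⟨b, rfl⟩ : ∃ b, t = b + 1 := ⟨t - 1, by omega⟩
  simp only [Nat.add_sub_cancel, V, Nat.zero_add, rowV, S_succ_last]
  simp only [S, List.range_zero, List.map_nil, List.sum_nil]
  ring

theorem pvSet_length (g : List (List Int)) (r c : Nat) (v : Int) :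
    (pvSet g r c v).length = g.length := by
  simp [pvSet]

theorem getD_set_gen {α : Type} (g : List α) (r i : Nat) (a d : α) :
    (g.set r a).getD i d = if i = r ∧ r < g.length then a else g.getD i d := by
  by_cases h : i = r ∧ r < g.length
  · obtain ⟨rfl, h2⟩ := h
    simp [List.getD_eq_getElem?_getD, h2]
  · rw [if_neg h]
    by_cases he : i = r
    · subst he
      have : ¬ i < g.length := by tauto
      simp [List.getD_eq_getElem?_getD, this]
    · simp [List.getD_eq_getElem?_getD, List.getElem?_set_ne (by omega : r ≠ i)]

theorem pvSet_row_length (g : List (List Int)) (r c : Nat) (v : Int) (i : Nat) :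
    ((pvSet g r c v).getD i []).length = (g.getD i []).length := by
  simp only [pvSet, getD_set_gen]
  split_ifs with h
  · obtain ⟨rfl, _⟩ := h; simp
  · rfl

theorem pvGet_pvSet (g : List (List Int)) (r c : Nat) (v : Int)
    (hr : r < g.length) (hc : c < (g.getD r []).length) (i j : Nat) :
    pvGet (pvSet g r c v) i j = if i = r ∧ j = c then v else pvGet g i j := by
  simp only [pvGet, pvSet, getD_set_gen]
  by_cases hi : i = r
  · subst hi
    rw [if_pos ⟨rfl, hr⟩]
    by_cases hj : j = c
    · subst hj; rw [if_pos ⟨rfl, rfl⟩, List.getD_eq_getElem?_getD,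
        List.getElem?_set_self (by omega)]
      simp
    · rw [if_neg (by tauto), List.getD_eq_getElem?_getD,
        List.getElem?_set_ne (by omega : c ≠ j), ← List.getD_eq_getElem?_getD]
  · rw [if_neg (by tauto), if_neg (by tauto)]


-- ---- A-side loop lemmas ----

theorem loop1_seg (g0 : List (List Int)) (k : Int) (C : Nat)
    (hC1 : 1 ≤ C) (hCle : ∀ i, i < g0.length → C ≤ (g0.getD i []).length) :
    ∀ (n s : Nat) (g : List (List Int)) (res : Int),
    1 ≤ s → s + n ≤ g0.length →
    g.length = g0.length →
    (∀ i, (g.getD i []).length = (g0.getD i []).length) →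
    (∀ i j, pvGet g i j = if i < s ∧ j = 0 then V g0 i 0 else pvGet g0 i j) →
    ((List.range' s n).foldl (stepCol k) (g, res)).1.length = g0.length ∧
    (∀ i, (((List.range' s n).foldl (stepCol k) (g, res)).1.getD i []).length = (g0.getD i []).length) ∧
    (∀ i j, pvGet ((List.range' s n).foldl (stepCol k) (g, res)).1 i j
        = if i < s + n ∧ j = 0 then V g0 i 0 else pvGet g0 i j) ∧
    ((List.range' s n).foldl (stepCol k) (g, res)).2 = res + S n (fun d => cnt k (V g0 (s + d) 0)) := by
  intro n
  induction n with
  | zero =>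
    intro s g res _ _ hlen hrow hg
    simp only [List.range', List.foldl_nil]
    exact ⟨hlen, hrow, by simpa using hg, by simp [S]⟩
  | succ n ih =>
    intro s g res hs hsn hlen hrow hg
    rw [List.range'_succ, List.foldl_cons]
    have hsR : s < g0.length := by omega
    have hrowlen : 0 < (g.getD s []).length := by
      rw [hrow s]; have := hCle s hsR; omega
    have hget : ∀ i j, pvGet (pvSet g s 0 (pvGet g s 0 + pvGet g (s-1) 0)) i j
        = if i = s ∧ j = 0 then pvGet g s 0 + pvGet g (s-1) 0 else pvGet g i j :=
      pvGet_pvSet g s 0 _ (by omega) (by omega)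
    have hval : pvGet g s 0 + pvGet g (s-1) 0 = V g0 s 0 := by
      rw [hg s 0, hg (s-1) 0, if_neg (by omega), if_pos (by omega), V_col_rec g0 s hs]
      ring
    have hstep : stepCol k (g, res) s
        = (pvSet g s 0 (pvGet g s 0 + pvGet g (s-1) 0),
           res + cnt k (V g0 s 0)) := by
      simp only [stepCol, cnt]
      rw [hget s 0, if_pos (show s = s ∧ 0 = 0 from ⟨rfl, rfl⟩), hval]
      split_ifs <;> simp
    rw [hstep]
    have hlen' : (pvSet g s 0 (pvGet g s 0 + pvGet g (s-1) 0)).length = g0.length := by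
      rw [pvSet_length]; exact hlen
    have hrow' : ∀ i, ((pvSet g s 0 (pvGet g s 0 + pvGet g (s-1) 0)).getD i []).length
        = (g0.getD i []).length := fun i => by rw [pvSet_row_length]; exact hrow i
    have hg' : ∀ i j, pvGet (pvSet g s 0 (pvGet g s 0 + pvGet g (s-1) 0)) i j
        = if i < s + 1 ∧ j = 0 then V g0 i 0 else pvGet g0 i j := by
      intro i j
      rw [hget i j]
      by_cases h : i = s ∧ j = 0
      · rw [if_pos h, if_pos (by omega), h.1, hval]
      · rw [if_neg h, hg i j]
        exact if_congr (by omega) rfl rfl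
    obtain ⟨c1, c2, c3, c4⟩ := ih (s+1) _ _ (by omega) (by omega) hlen' hrow' hg'
    refine ⟨c1, c2, ?_, ?_⟩
    · intro i j; rw [c3 i j]; exact if_congr (by omega) rfl rfl
    · rw [c4, S_succ_head]
      have : ∀ d, s + 1 + d = s + (d + 1) := by omega
      simp only [this]
      ring

theorem loop2_seg (g0 : List (List Int)) (k : Int) (C : Nat)
    (hR1 : 1 ≤ g0.length) (hCle : ∀ i, i < g0.length → C ≤ (g0.getD i []).length) :
    ∀ (n t : Nat) (g : List (List Int)) (res : Int),
    1 ≤ t → t + n ≤ C →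
    g.length = g0.length →
    (∀ i, (g.getD i []).length = (g0.getD i []).length) →
    (∀ i j, pvGet g i j = if (j = 0 ∧ i < g0.length) ∨ (i = 0 ∧ j < t) then V g0 i j else pvGet g0 i j) →
    ((List.range' t n).foldl (stepRow k) (g, res)).1.length = g0.length ∧
    (∀ i, (((List.range' t n).foldl (stepRow k) (g, res)).1.getD i []).length = (g0.getD i []).length) ∧
    (∀ i j, pvGet ((List.range' t n).foldl (stepRow k) (g, res)).1 i j
        = if (j = 0 ∧ i < g0.length) ∨ (i = 0 ∧ j < t + n) then V g0 i j else pvGet g0 i j) ∧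
    ((List.range' t n).foldl (stepRow k) (g, res)).2 = res + S n (fun d => cnt k (V g0 0 (t + d))) := by
  intro n
  induction n with
  | zero =>
    intro t g res _ _ hlen hrow hg
    simp only [List.range', List.foldl_nil]
    exact ⟨hlen, hrow, by simpa using hg, by simp [S]⟩
  | succ n ih =>
    intro t g res ht htn hlen hrow hg
    rw [List.range'_succ, List.foldl_cons]
    have hrowlen : t < (g.getD 0 []).length := by
      rw [hrow 0]; have := hCle 0 (by omega); omega
    have hget : ∀ i j, pvGet (pvSet g 0 t (pvGet g 0 t + pvGet g 0 (t-1))) i j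
        = if i = 0 ∧ j = t then pvGet g 0 t + pvGet g 0 (t-1) else pvGet g i j :=
      pvGet_pvSet g 0 t _ (by omega) (by omega)
    have hval : pvGet g 0 t + pvGet g 0 (t-1) = V g0 0 t := by
      by_cases h0 : t - 1 = 0
      · rw [hg 0 t, hg 0 (t-1), if_neg (by omega), h0, if_pos (by omega),
          V_row_rec g0 t ht, h0, V_zero_zero]
        ring
      · rw [hg 0 t, hg 0 (t-1), if_neg (by omega), if_pos (by omega),
          V_row_rec g0 t ht]
        ring
    have hstep : stepRow k (g, res) t
        = (pvSet g 0 t (pvGet g 0 t + pvGet g 0 (t-1)), res + cnt k (V g0 0 t)) := by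
      simp only [stepRow, cnt]
      rw [hget 0 t, if_pos (show (0:Nat) = 0 ∧ t = t from ⟨rfl, rfl⟩), hval]
      split_ifs <;> simp
    rw [hstep]
    have hg' : ∀ i j, pvGet (pvSet g 0 t (pvGet g 0 t + pvGet g 0 (t-1))) i j
        = if (j = 0 ∧ i < g0.length) ∨ (i = 0 ∧ j < t + 1) then V g0 i j else pvGet g0 i j := by
      intro i j
      rw [hget i j]
      by_cases h : i = 0 ∧ j = t
      · rw [if_pos h, if_pos (by omega), h.1, h.2, hval]
      · rw [if_neg h, hg i j]
        exact if_congr (by omega) rfl rfl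
    obtain ⟨c1, c2, c3, c4⟩ := ih (t+1) _ _ (by omega) (by omega)
      (by rw [pvSet_length]; exact hlen) (fun i => by rw [pvSet_row_length]; exact hrow i) hg'
    refine ⟨c1, c2, ?_, ?_⟩
    · intro i j; rw [c3 i j]; exact if_congr (by omega) rfl rfl
    · rw [c4, S_succ_head]
      have : ∀ d, t + 1 + d = t + (d + 1) := by omega
      simp only [this]
      ring

theorem loop3_inner (g0 : List (List Int)) (k : Int) (C : Nat) (s : Nat)
    (hCle : ∀ i, i < g0.length → C ≤ (g0.getD i []).length)
    (hs : 1 ≤ s) (hsR : s < g0.length) :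
    ∀ (n t : Nat) (g : List (List Int)) (res : Int),
    1 ≤ t → t + n ≤ C →
    g.length = g0.length →
    (∀ i, (g.getD i []).length = (g0.getD i []).length) →
    (∀ i j, pvGet g i j = if Cnd g0.length C s t i j then V g0 i j else pvGet g0 i j) →
    ((List.range' t n).foldl (stepCell k s) (g, res)).1.length = g0.length ∧
    (∀ i, (((List.range' t n).foldl (stepCell k s) (g, res)).1.getD i []).length = (g0.getD i []).length) ∧
    (∀ i j, pvGet ((List.range' t n).foldl (stepCell k s) (g, res)).1 i j
        = if Cnd g0.length C s (t + n) i j then V g0 i j else pvGet g0 i j) ∧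
    ((List.range' t n).foldl (stepCell k s) (g, res)).2 = res + S n (fun d => cnt k (V g0 s (t + d))) := by
  intro n
  induction n with
  | zero =>
    intro t g res _ _ hlen hrow hg
    simp only [List.range', List.foldl_nil]
    exact ⟨hlen, hrow, by simpa using hg, by simp [S]⟩
  | succ n ih =>
    intro t g res ht htn hlen hrow hg
    rw [List.range'_succ, List.foldl_cons]
    have hrowlen : t < (g.getD s []).length := by
      rw [hrow s]; have := hCle s hsR; omega
    set v := pvGet g s t + (pvGet g (s-1) t + pvGet g s (t-1) - pvGet g (s-1) (t-1)) with hv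
    have hget : ∀ i j, pvGet (pvSet g s t v) i j
        = if i = s ∧ j = t then v else pvGet g i j :=
      pvGet_pvSet g s t v (by omega) (by omega)
    have hval : v = V g0 s t := by
      have e1 : pvGet g s t = pvGet g0 s t := by
        rw [hg s t, if_neg (by unfold Cnd; omega)]
      have e2 : pvGet g (s-1) t = V g0 (s-1) t := by
        rw [hg (s-1) t, if_pos (by unfold Cnd; omega)]
      have e3 : pvGet g s (t-1) = V g0 s (t-1) := by
        rw [hg s (t-1), if_pos (by unfold Cnd; omega)]
      have e4 : pvGet g (s-1) (t-1) = V g0 (s-1) (t-1) := by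
        rw [hg (s-1) (t-1), if_pos (by unfold Cnd; omega)]
      rw [hv, e1, e2, e3, e4, V_rec g0 s t hs ht]
      ring
    have hstep : stepCell k s (g, res) t = (pvSet g s t v, res + cnt k (V g0 s t)) := by
      have h0 : stepCell k s (g, res) t
          = (pvSet g s t v, if pvGet (pvSet g s t v) s t ≤ k then res + 1 else res) := rfl
      rw [h0, hget s t, if_pos (show s = s ∧ t = t from ⟨rfl, rfl⟩), hval]
      simp only [cnt]
      split_ifs <;> simp
    rw [hstep]
    have hg' : ∀ i j, pvGet (pvSet g s t v) i j
        = if Cnd g0.length C s (t+1) i j then V g0 i j else pvGet g0 i j := by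
      intro i j
      rw [hget i j]
      by_cases h : i = s ∧ j = t
      · rw [if_pos h, if_pos (by unfold Cnd; omega), h.1, h.2, hval]
      · rw [if_neg h, hg i j]
        exact if_congr (by unfold Cnd; omega) rfl rfl
    obtain ⟨c1, c2, c3, c4⟩ := ih (t+1) _ _ (by omega) (by omega)
      (by rw [pvSet_length]; exact hlen) (fun i => by rw [pvSet_row_length]; exact hrow i) hg'
    refine ⟨c1, c2, ?_, ?_⟩
    · intro i j; rw [c3 i j]; exact if_congr (by unfold Cnd; omega) rfl rfl
    · rw [c4, S_succ_head]
      have : ∀ d, t + 1 + d = t + (d + 1) := by omega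
      simp only [this]
      ring

theorem loop3_outer (g0 : List (List Int)) (k : Int) (C : Nat)
    (hC1 : 1 ≤ C) (hCle : ∀ i, i < g0.length → C ≤ (g0.getD i []).length) :
    ∀ (n s : Nat) (g : List (List Int)) (res : Int),
    1 ≤ s → s + n ≤ g0.length →
    g.length = g0.length →
    (∀ i, (g.getD i []).length = (g0.getD i []).length) →
    (∀ i j, pvGet g i j = if Cnd g0.length C s 1 i j then V g0 i j else pvGet g0 i j) →
    ((List.range' s n).foldl (stepOuter k C) (g, res)).2
      = res + S n (fun d => S (C-1) (fun e => cnt k (V g0 (s + d) (1 + e)))) := by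
  intro n
  induction n with
  | zero =>
    intro s g res _ _ _ _ _
    simp [List.range', S]
  | succ n ih =>
    intro s g res hs hsn hlen hrow hg
    rw [List.range'_succ, List.foldl_cons]
    obtain ⟨c1, c2, c3, c4⟩ := loop3_inner g0 k C s hCle hs (by omega)
      (C-1) 1 g res (by omega) (by omega) hlen hrow hg
    have hg' : ∀ i j, pvGet ((List.range' 1 (C-1)).foldl (stepCell k s) (g, res)).1 i j
        = if Cnd g0.length C (s+1) 1 i j then V g0 i j else pvGet g0 i j := by
      intro i j
      rw [c3 i j]
      exact if_congr (by unfold Cnd; omega) rfl rfl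
    have hout : stepOuter k C (g, res) s = (List.range' 1 (C-1)).foldl (stepCell k s) (g, res) := rfl
    rw [hout]
    have := ih (s+1) ((List.range' 1 (C-1)).foldl (stepCell k s) (g, res)).1
      ((List.range' 1 (C-1)).foldl (stepCell k s) (g, res)).2 (by omega) (by omega) c1 c2 hg'
    rw [this, c4, S_succ_head]
    have hsh : ∀ d, s + 1 + d = s + (d + 1) := by omega
    simp only [hsh]
    ring

-- ---- B-side lemmas ----

-- pvAccumulate as explicit prefix sums starting from a
def pfxFrom (a : Int) : List Int → List Int
  | [] => []
  | x :: xs => (a + x) :: pfxFrom (a + x) xs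

theorem accAux : ∀ (row : List Int) (a : Int) (out : List Int),
    row.foldl (fun (st : Int × List Int) x => (st.1 + x, st.2 ++ [st.1 + x])) (a, out)
      = (a + row.sum, out ++ pfxFrom a row) := by
  intro row
  induction row with
  | nil => intro a out; simp [pfxFrom]
  | cons x xs ih =>
    intro a out
    simp only [List.foldl_cons, ih, pfxFrom, List.sum_cons, List.append_assoc,
      List.singleton_append]
    have hsum : a + x + xs.sum = a + (x + xs.sum) := by ring
    rw [hsum]

theorem pvAccumulate_eq (row : List Int) : pvAccumulate row = pfxFrom 0 row := by
  simp [pvAccumulate, accAux]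

theorem pfxFrom_length (a : Int) (row : List Int) : (pfxFrom a row).length = row.length := by
  induction row generalizing a with
  | nil => rfl
  | cons x xs ih => simp [pfxFrom, ih]

theorem pfxFrom_getD : ∀ (row : List Int) (a : Int) (c : Nat), c < row.length →
    (pfxFrom a row).getD c 0 = a + S (c+1) (fun j => row.getD j 0) := by
  intro row
  induction row with
  | nil => intro a c h; simp at h
  | cons x xs ih =>
    intro a c h
    cases c with
    | zero => simp [pfxFrom, S]
    | succ c =>
      simp only [pfxFrom, List.getD_cons_succ]
      rw [ih (a + x) c (by simpa using h), S_succ_head (c+1)]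
      have hfun : (fun i => (x :: xs).getD (i+1) 0) = fun i => xs.getD i 0 := by
        funext i; simp
      simp only [hfun, List.getD_cons_zero]
      ring

theorem zip_map_add (C : Nat) (f : Nat → Int) (bs : List Int) (h : C ≤ bs.length) :
    ((((List.range C).map f).zip bs).map (fun p => p.1 + p.2))
      = (List.range C).map (fun c => f c + bs.getD c 0) := by
  apply List.ext_getElem
  · simp; omega
  · intro i h1 h2
    simp only [List.getElem_map, List.getElem_zip, List.getElem_range] at *
    have hi : i < C := by simpa using h2
    rw [List.getD_eq_getElem bs 0 (by omega)]

theorem filter_len_S (k : Int) (C : Nat) (h : Nat → Int) :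
    ((((List.range C).map h).filter (fun v => decide (v ≤ k))).length : Int)
      = S C (fun c => cnt k (h c)) := by
  induction C with
  | zero => simp [S]
  | succ n ih =>
    rw [S_succ_last, List.range_succ]
    simp only [List.map_append, List.filter_append, List.length_append]
    rw [← ih]
    simp only [List.map_cons, List.map_nil, cnt]
    split_ifs with hle
    · simp [List.filter, hle]
    · simp [List.filter, hle]

-- B's per-row running total, written as a recursion over the remaining rows
def bsum (k : Int) (C : Nat) : List (List Int) → (Nat → Int) → Int
  | [], _ => 0
  | row :: rest, f =>
      S C (fun c => cnt k (f c + S (c+1) (fun j => row.getD j 0)))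
        + bsum k C rest (fun c => f c + S (c+1) (fun j => row.getD j 0))

theorem bloop (k : Int) (C : Nat) :
    ∀ (rs : List (List Int)) (f : Nat → Int) (res : Int),
    (∀ row ∈ rs, C ≤ row.length) →
    ((rs.foldl (stepB k) ((List.range C).map f, res)).2 = res + bsum k C rs f) := by
  intro rs
  induction rs with
  | nil => intro f res _; simp [bsum]
  | cons row rest ih =>
    intro f res hlen
    rw [List.foldl_cons]
    have hrow : C ≤ (pvAccumulate row).length := by
      rw [pvAccumulate_eq, pfxFrom_length]; exact hlen row (by simp)
    have hstep : stepB k ((List.range C).map f, res) row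
        = ((List.range C).map (fun c => f c + S (c+1) (fun j => row.getD j 0)),
           res + S C (fun c => cnt k (f c + S (c+1) (fun j => row.getD j 0)))) := by
      simp only [stepB]
      rw [zip_map_add C f (pvAccumulate row) hrow]
      have hpt : ∀ c ∈ List.range C, f c + (pvAccumulate row).getD c 0
          = f c + S (c+1) (fun j => row.getD j 0) := by
        intro c hc
        rw [pvAccumulate_eq, pfxFrom_getD row 0 c
          (by have h1 := hlen row (by simp); simp at hc; omega)]
        ring
      rw [List.map_congr_left hpt, filter_len_S]
    rw [hstep, ih _ _ (fun r hr => hlen r (by simp [hr])), bsum]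
    ring

-- sum of rows 0..t-1 of the original grid at column prefix c
def pre (g0 : List (List Int)) (t c : Nat) : Int := S t (fun i => rowV g0 i c)

theorem bsum_char (g0 : List (List Int)) (k : Int) (C : Nat) :
    ∀ (m t : Nat), t + m = g0.length →
    bsum k C (g0.drop t) (fun c => pre g0 t c)
      = S m (fun d => S C (fun c => cnt k (V g0 (t + d) c))) := by
  intro m
  induction m with
  | zero =>
    intro t ht
    rw [List.drop_of_length_le (by omega)]
    simp [bsum, S]
  | succ m ih =>
    intro t ht
    have htl : t < g0.length := by omega
    rw [List.drop_eq_getElem_cons htl, bsum]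
    have hrow : ∀ c, S (c+1) (fun j => (g0[t]).getD j 0) = rowV g0 t c := by
      intro c
      simp only [rowV]
      congr 1
      funext j
      simp [pvGet, List.getD_eq_getElem?_getD, List.getElem?_eq_getElem htl]
    have hf : (fun c => pre g0 t c + S (c+1) (fun j => (g0[t]).getD j 0))
        = fun c => pre g0 (t+1) c := by
      funext c
      rw [hrow c]
      simp [pre, S_succ_last]
    have hcell : ∀ c, pre g0 t c + S (c+1) (fun j => (g0[t]).getD j 0) = V g0 t c := by
      intro c
      rw [hrow c]
      simp [pre, V, S_succ_last]
    have hrw : (fun c => cnt k (pre g0 t c + S (c+1) (fun j => (g0[t]).getD j 0)))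
        = fun c => cnt k (V g0 t c) := by funext c; rw [hcell c]
    rw [hrw, hf, ih (t+1) (by omega), S_succ_head]
    have hsh : ∀ d, t + 1 + d = t + (d + 1) := by omega
    simp only [hsh]
    ring

-- ===== VERDICT (by name: the statement is the Claim_ definition above) =====
theorem countSubmatrices_spec : Claim_equal_countSubmatrices := by
  intro grid k hdom hpre
  unfold Spec_countSubmatrices
  obtain ⟨hne, hh1, hrows⟩ := hpre
  have hR1 : 1 ≤ grid.length := by
    cases grid with
    | nil => exact absurd rfl hne
    | cons a l => simp
  have hhead : grid.headD [] = grid.getD 0 [] := by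
    cases grid with
    | nil => rfl
    | cons a l => rfl
  have hC1 : 1 ≤ (grid.getD 0 []).length := by rw [← hhead]; exact hh1
  have hCle : ∀ i, i < grid.length → (grid.getD 0 []).length ≤ (grid.getD i []).length := by
    intro i hi
    rw [← hhead, List.getD_eq_getElem grid [] hi]
    exact hrows _ (List.getElem_mem hi)
  have hmem : ∀ row ∈ grid, (grid.getD 0 []).length ≤ row.length := by
    intro row hr
    rw [← hhead]
    exact hrows row hr
  -- names for the two dimensions
  set R := grid.length with hRdef
  set C := (grid.getD 0 []).length with hCdef
  -- ---- evaluate A ----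
  have hg0 : ∀ i j, pvGet grid i j = if i < 1 ∧ j = 0 then V grid i 0 else pvGet grid i j := by
    intro i j
    split_ifs with h
    · obtain ⟨hi, hj⟩ := h
      have hi0 : i = 0 := by omega
      subst hi0; subst hj
      exact (V_zero_zero grid).symm
    · rfl
  obtain ⟨a1, a2, a3, a4⟩ := loop1_seg grid k C hC1 hCle (R - 1) 1 grid
    (if pvGet grid 0 0 ≤ k then (0:Int) + 1 else 0) (by omega) (by omega) rfl (fun _ => rfl) hg0
  set st1 := (List.range' 1 (R - 1)).foldl (stepCol k)
    (grid, if pvGet grid 0 0 ≤ k then (0:Int) + 1 else 0) with hst1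
  have hg1 : ∀ i j, pvGet st1.1 i j
      = if (j = 0 ∧ i < grid.length) ∨ (i = 0 ∧ j < 1) then V grid i j else pvGet grid i j := by
    intro i j
    rw [a3 i j]
    by_cases h : j = 0
    · subst h; exact if_congr (by omega) rfl rfl
    · rw [if_neg (by omega), if_neg (by omega)]
  obtain ⟨b1, b2, b3, b4⟩ := loop2_seg grid k C hR1 hCle (C - 1) 1 st1.1 st1.2
    (by omega) (by omega) a1 a2 hg1
  set st2 := (List.range' 1 (C - 1)).foldl (stepRow k) (st1.1, st1.2) with hst2
  have hg2 : ∀ i j, pvGet st2.1 i j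
      = if Cnd grid.length C 1 1 i j then V grid i j else pvGet grid i j := by
    intro i j
    rw [b3 i j]
    exact if_congr (by unfold Cnd; omega) rfl rfl
  have hout := loop3_outer grid k C hC1 hCle (R - 1) 1 st2.1 st2.2
    (by omega) (by omega) b1 b2 hg2
  have hAdef : countSubmatrices grid k
      = ((List.range' 1 (R - 1)).foldl (stepOuter k C) (st2.1, st2.2)).2 := by
    rw [hst2, hst1]
    rfl
  have hres0 : (if pvGet grid 0 0 ≤ k then (0:Int) + 1 else 0) = cnt k (V grid 0 0) := by
    rw [← V_zero_zero, cnt]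
    split_ifs <;> ring
  have hA : countSubmatrices grid k
      = cnt k (V grid 0 0)
        + S (R - 1) (fun d => cnt k (V grid (1 + d) 0))
        + S (C - 1) (fun e => cnt k (V grid 0 (1 + e)))
        + S (R - 1) (fun d => S (C - 1) (fun e => cnt k (V grid (1 + d) (1 + e)))) := by
    rw [hAdef, hout, b4, a4, hres0]
  -- ---- evaluate B ----
  have hzero : ∀ c : Nat, pre grid 0 c = 0 := by
    intro c; simp [pre, S]
  have hrep : (List.range C).map (fun c => pre grid 0 c) = List.replicate C (0:Int) := by
    rw [show (fun c => pre grid 0 c) = (fun _ : Nat => (0:Int)) from funext hzero]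
    simp
  have hB : countSubmatrices_alt grid k
      = S R (fun d => S C (fun c => cnt k (V grid d c))) := by
    show ((grid.foldl (stepB k) (List.replicate C (0:Int), 0)).2 : Int) = _
    rw [← hrep, bloop k C grid (fun c => pre grid 0 c) 0 hmem]
    have hchar := bsum_char grid k C R 0 (by omega)
    rw [List.drop_zero] at hchar
    rw [hchar]
    simp
  -- ---- both sides count the same cells ----
  obtain ⟨r, hr⟩ : ∃ r, R = r + 1 := ⟨R - 1, by omega⟩
  obtain ⟨c, hc⟩ : ∃ c, C = c + 1 := ⟨C - 1, by omega⟩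
  have hswap : ∀ d : Nat, 1 + d = d + 1 := fun d => Nat.add_comm 1 d
  rw [hA, hB, hr, hc]
  simp only [Nat.add_sub_cancel, hswap]
  rw [S_succ_head r, S_succ_head c]
  have hrow : (fun d => S (c + 1) fun j => cnt k (V grid (d + 1) j))
      = fun d => cnt k (V grid (d + 1) 0) + S c (fun e => cnt k (V grid (d + 1) (e + 1))) := by
    funext d
    rw [S_succ_head c]
  rw [hrow, S_add]
  ring
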